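-- pv_equiv track=rewrite | github.com/Tractables/pyjuice | src/pyjuice/layer/compilation.py | get_chunk_ids
-- ===== SOURCE A (Python) =====
-- def get_chunk_ids(n, k):
--     chunk_size = n // k
--     remainder = n % k
--
--     chunks = []
--     start = 0
--     for i in range(k):
--         if i < remainder:
--             end = start + chunk_size + 1
--         else:
--             end = start + chunk_size
--
--         chunks.append((start, end))
--         start = end
--
--     return chunks
-- ===== SOURCE B (Python) =====
-- def get_chunk_ids(n, k):
--     chunk_size = n // k
--     remainder = n % k
--     return [(i * chunk_size + min(i, remainder),
--              (i + 1) * chunk_size + min(i + 1, remainder))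
--             for i in range(k)]
-- ===== Notes on version B (the rewrite author's own statement) =====
-- stated objective: simpler
-- what changed: Replaced the sequential loop that threads a running start accumulator with a comprehension computing each chunk's boundaries in closed form from its index (i*chunk_size + min(i, remainder)).
import Mathlib
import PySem

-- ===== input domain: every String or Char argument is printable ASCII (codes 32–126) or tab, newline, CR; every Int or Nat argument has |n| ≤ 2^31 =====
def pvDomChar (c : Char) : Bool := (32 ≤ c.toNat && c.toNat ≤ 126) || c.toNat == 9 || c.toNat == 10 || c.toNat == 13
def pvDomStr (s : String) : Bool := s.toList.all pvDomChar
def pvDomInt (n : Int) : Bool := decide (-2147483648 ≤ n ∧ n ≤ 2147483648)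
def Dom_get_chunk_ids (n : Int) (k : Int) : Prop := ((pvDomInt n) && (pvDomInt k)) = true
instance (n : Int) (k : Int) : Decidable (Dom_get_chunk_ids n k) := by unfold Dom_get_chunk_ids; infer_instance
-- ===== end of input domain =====

-- B replaces A's accumulator-threading loop with a closed-form per-index formula; equivalence proved for k != 0 (k = 0 raises ZeroDivisionError in both).
-- ===== PORT A =====
def get_chunk_ids (n : Int) (k : Int) : List (Int × Int) :=
  let chunk_size := PySem.Int.floordiv n k
  let remainder := PySem.Int.mod n k
  let res := (PySem.List.pyRange 0 k 1).foldl
    (fun (s : List (Int × Int) × Int) i =>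
      let e := if i < remainder then s.2 + chunk_size + 1 else s.2 + chunk_size
      (s.1 ++ [(s.2, e)], e))
    ([], 0)
  res.1

-- ===== PORT B =====
def get_chunk_ids_alt (n : Int) (k : Int) : List (Int × Int) :=
  let chunk_size := PySem.Int.floordiv n k
  let remainder := PySem.Int.mod n k
  (PySem.List.pyRange 0 k 1).map
    (fun i => (i * chunk_size + min i remainder, (i + 1) * chunk_size + min (i + 1) remainder))

-- ===== PRECONDITION & SPEC =====
-- Pre_ excludes exactly k = 0, on which Python A raises ZeroDivisionError (n // k).
def Pre_get_chunk_ids (n : Int) (k : Int) : Prop := k ≠ 0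
instance (n : Int) (k : Int) : Decidable (Pre_get_chunk_ids n k) := by unfold Pre_get_chunk_ids; infer_instance
def pvWitness_get_chunk_ids : Int × Int := (7, 3)
def Spec_get_chunk_ids (n : Int) (k : Int) (out : List (Int × Int)) : Prop := out = get_chunk_ids_alt n k
instance (n : Int) (k : Int) (out : List (Int × Int)) : Decidable (Spec_get_chunk_ids n k out) := by unfold Spec_get_chunk_ids; infer_instance

-- ===== CLAIM (what is proved, stated in full; the proofs are below) =====
def Claim_equal_get_chunk_ids : Prop := ∀ (n : Int) (k : Int), Dom_get_chunk_ids n k → Pre_get_chunk_ids n k → Spec_get_chunk_ids n k (get_chunk_ids n k)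

-- ===== LEMMAS AND PROOFS =====

-- Loop invariant (for 0 ≤ r): after folding the first m indices, the accumulator is B's
-- closed-form map over those indices, and the carried start equals m*c + min m r.
theorem get_chunk_ids_loop (c r : Int) (hr : 0 ≤ r) (m : Nat) :
    List.foldl
      (fun (s : List (Int × Int) × Int) i =>
        (s.1 ++ [(s.2, if i < r then s.2 + c + 1 else s.2 + c)],
         if i < r then s.2 + c + 1 else s.2 + c))
      ([], 0) (List.map (fun j : Nat => ((0 : Int) + (j : Int))) (List.range m))
    = (List.map (fun i => (i * c + min i r, (i + 1) * c + min (i + 1) r))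
         (List.map (fun j : Nat => ((0 : Int) + (j : Int))) (List.range m)),
       (m : Int) * c + min (m : Int) r) := by
  induction m with
  | zero => simp [min_eq_left hr]
  | succ m ih =>
    rw [List.range_succ, List.map_append, List.foldl_append, List.map_append, ih]
    simp only [List.map_cons, List.map_nil, List.foldl_cons, List.foldl_nil, Prod.mk.injEq]
    by_cases h : (m : Int) < r
    · rw [if_pos (by simpa using h)]
      refine ⟨?_, ?_⟩
      · rw [List.append_cancel_left_eq]; simp
        rw [min_eq_left (by omega), min_eq_left (by omega)]; ring
      · push_cast
        rw [min_eq_left (by omega), min_eq_left (by omega)]; ring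
    · rw [if_neg (by simpa using h)]
      refine ⟨?_, ?_⟩
      · rw [List.append_cancel_left_eq]; simp
        rw [min_eq_right (by omega), min_eq_right (by omega)]; ring
      · push_cast
        rw [min_eq_right (by omega), min_eq_right (by omega)]; ring

-- ===== VERDICT (by name: the statement is the Claim_ definition above) =====
theorem get_chunk_ids_spec : Claim_equal_get_chunk_ids := by
  intro n k _ hk
  unfold Spec_get_chunk_ids get_chunk_ids get_chunk_ids_alt
  dsimp only
  rcases Int.lt_or_le k 0 with h | h
  · rw [PySem.List.pyRange_one]
    rw [Int.toNat_of_nonpos (by omega)]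
    simp
  · have hk0 : 0 < k := lt_of_le_of_ne h (Ne.symm hk)
    rw [PySem.List.pyRange_one, Int.sub_zero]
    rw [get_chunk_ids_loop _ _ (PySem.Int.mod_nonneg n hk0) k.toNat]
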